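-- pv_equiv track=rewrite | github.com/sanjmeh/python_in_R | ID_event.py | Off_On_grouping
-- ===== SOURCE A (Python) =====
-- def Off_On_grouping(indicator):
--     buckets = []
--     start_position = None
--     for i, value in enumerate(indicator):
--         if value == 'end':
--             if start_position is not None:
--                 end_position = i
--                 buckets.append((start_position, end_position))
--             start_position = i
--         elif value == 'strt':
--             if start_position is not None:
--                 end_position = i
--                 buckets.append((start_position, end_position))
--                 start_position = None
--     if start_position is not None:
--         buckets.append((start_position, len(indicator)))
--     return buckets
-- ===== SOURCE B (Python) =====
-- def Off_On_grouping(indicator):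
--     rel = [(i, v) for i, v in enumerate(indicator) if v in ('end', 'strt')]
--     buckets = [(i, j) for (i, ti), (j, _tj) in zip(rel, rel[1:]) if ti == 'end']
--     if rel and rel[-1][1] == 'end':
--         buckets.append((rel[-1][0], len(indicator)))
--     return buckets
-- ===== Notes on version B (the rewrite author's own statement) =====
-- stated objective: alternative
-- what changed: Replaces the stateful start_position/None accumulator loop by a filter of the relevant ('end'/'strt') positions followed by a pairwise zip scan, flushing a trailing interval when the last relevant token is 'end'.
import Mathlib
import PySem

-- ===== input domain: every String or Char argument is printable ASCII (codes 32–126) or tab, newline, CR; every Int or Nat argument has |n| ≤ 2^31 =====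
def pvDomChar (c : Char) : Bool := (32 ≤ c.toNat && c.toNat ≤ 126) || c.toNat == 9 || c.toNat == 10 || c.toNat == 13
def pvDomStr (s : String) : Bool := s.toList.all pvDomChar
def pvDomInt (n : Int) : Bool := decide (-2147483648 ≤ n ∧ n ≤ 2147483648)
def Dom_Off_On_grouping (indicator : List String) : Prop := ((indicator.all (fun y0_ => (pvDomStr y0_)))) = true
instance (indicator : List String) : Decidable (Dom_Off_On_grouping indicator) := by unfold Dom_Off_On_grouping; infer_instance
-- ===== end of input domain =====

-- B replaces A's stateful start_position accumulator loop by a filter of the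
-- relevant positions plus a pairwise zip scan (alternative decomposition, same cost).

-- ===== PORT A =====
-- one loop step of A: state = (buckets, start_position), input = (i, value)
def offOnStepA (st : List (Int × Int) × Option Int) (p : Int × String) :
    List (Int × Int) × Option Int :=
  if p.2 == "end" then
    match st.2 with
    | some s => (st.1 ++ [(s, p.1)], some p.1)
    | none => (st.1, some p.1)
  else if p.2 == "strt" then
    match st.2 with
    | some s => (st.1 ++ [(s, p.1)], none)
    | none => st
  else st

def Off_On_grouping (indicator : List String) : List (Int × Int) :=
  let r := (PySem.List.enumerate indicator).foldl offOnStepA ([], none)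
  match r.2 with
  | some s => r.1 ++ [(s, (indicator.length : Int))]
  | none => r.1

-- ===== PORT B =====
def Off_On_grouping_alt (indicator : List String) : List (Int × Int) :=
  let rel := (PySem.List.enumerate indicator).filter
      (fun p => p.2 == "end" || p.2 == "strt")
  let buckets := ((rel.zip rel.tail).filter (fun q => q.1.2 == "end")).map
      (fun q => (q.1.1, q.2.1))
  match rel.getLast? with
  | some (j, v) => if v == "end" then buckets ++ [(j, (indicator.length : Int))] else buckets
  | none => buckets

-- ===== PRECONDITION & SPEC =====
def Spec_Off_On_grouping (indicator : List String) (out : List (Int × Int)) : Prop := out = Off_On_grouping_alt indicator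
instance (indicator : List String) (out : List (Int × Int)) : Decidable (Spec_Off_On_grouping indicator out) := by unfold Spec_Off_On_grouping; infer_instance

-- ===== CLAIM (what is proved, stated in full; the proofs are below) =====
def Claim_equal_Off_On_grouping : Prop := ∀ (indicator : List String), Dom_Off_On_grouping indicator → Spec_Off_On_grouping indicator (Off_On_grouping indicator)

-- ===== LEMMAS AND PROOFS =====

-- the intervals A's loop emits over a suffix, from a given start state
def emitted (l : List (Int × String)) (st : Option Int) : List (Int × Int) :=
  match l with
  | [] => []
  | (j, v) :: rest =>
    if v == "end" then
      (match st with | some s => [(s, j)] | none => []) ++ emitted rest (some j)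
    else if v == "strt" then
      (match st with | some s => [(s, j)] | none => []) ++ emitted rest none
    else emitted rest st

-- A's loop final start state over a suffix
def finSt (l : List (Int × String)) (st : Option Int) : Option Int :=
  match l with
  | [] => st
  | (j, v) :: rest =>
    if v == "end" then finSt rest (some j)
    else if v == "strt" then finSt rest none
    else finSt rest st

lemma foldA_eq (l : List (Int × String)) :
    ∀ (acc : List (Int × Int)) (st : Option Int),
    l.foldl offOnStepA (acc, st) = (acc ++ emitted l st, finSt l st) := by
  induction l with
  | nil => intro acc st; simp [emitted, finSt]
  | cons p rest ih =>
    intro acc st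
    obtain ⟨j, v⟩ := p
    by_cases he : v = "end"
    · cases st <;> simp [offOnStepA, emitted, finSt, he, ih]
    · by_cases hs : v = "strt"
      · cases st <;> simp [offOnStepA, emitted, finSt, hs, ih]
      · simp [offOnStepA, emitted, finSt, he, hs, ih]

-- emitted/finSt only look at the relevant entries
lemma emitted_filter (l : List (Int × String)) :
    ∀ st, emitted (l.filter (fun p => p.2 == "end" || p.2 == "strt")) st = emitted l st := by
  induction l with
  | nil => intro st; simp
  | cons p rest ih =>
    intro st
    obtain ⟨j, v⟩ := p
    by_cases he : v = "end"
    · simp [emitted, he, ih]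
    · by_cases hs : v = "strt"
      · simp [emitted, hs, ih]
      · simp [emitted, he, hs, ih]

lemma finSt_filter (l : List (Int × String)) :
    ∀ st, finSt (l.filter (fun p => p.2 == "end" || p.2 == "strt")) st = finSt l st := by
  induction l with
  | nil => intro st; simp
  | cons p rest ih =>
    intro st
    obtain ⟨j, v⟩ := p
    by_cases he : v = "end"
    · simp [finSt, he, ih]
    · by_cases hs : v = "strt"
      · simp [finSt, hs, ih]
      · simp [finSt, he, hs, ih]

-- every token of a filtered list is relevant
def allRel (l : List (Int × String)) : Prop :=
  ∀ p ∈ l, p.2 = "end" ∨ p.2 = "strt"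

lemma allRel_filter (l : List (Int × String)) :
    allRel (l.filter (fun p => p.2 == "end" || p.2 == "strt")) := by
  intro p hp
  have := List.of_mem_filter hp
  simpa using this

-- on a relevant nonempty list, starting from (some s) prepends one interval ending at the head
lemma emitted_some_cons (j : Int) (v : String) (rest : List (Int × String))
    (h : v = "end" ∨ v = "strt") (s : Int) :
    emitted ((j, v) :: rest) (some s) = (s, j) :: emitted ((j, v) :: rest) none := by
  rcases h with he | hs
  · simp [emitted, he]
  · have hne : v ≠ "end" := by simp [hs]
    simp [emitted, hs]

lemma finSt_some_cons (j : Int) (v : String) (rest : List (Int × String))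
    (h : v = "end" ∨ v = "strt") (s : Int) :
    finSt ((j, v) :: rest) (some s) = finSt ((j, v) :: rest) none := by
  rcases h with he | hs
  · simp [finSt, he]
  · have hne : v ≠ "end" := by simp [hs]
    simp [finSt, hs]

-- B's pairwise pass ++ trailing flush, as one recursion over the relevant list
lemma b_core (rel : List (Int × String)) (h : allRel rel) (n : Int) :
    (((rel.zip rel.tail).filter (fun q => q.1.2 == "end")).map (fun q => (q.1.1, q.2.1))) ++
      (match rel.getLast? with
       | some (j, v) => if v == "end" then [(j, n)] else []
       | none => []) =
    emitted rel none ++ (match finSt rel none with | some s => [(s, n)] | none => []) := by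
  induction rel with
  | nil => simp [emitted, finSt]
  | cons p rest ih =>
    obtain ⟨j, v⟩ := p
    have hrest : allRel rest := fun q hq => h q (List.mem_cons_of_mem _ hq)
    have hjv : v = "end" ∨ v = "strt" := by simpa using h (j, v) (by simp)
    rcases hjv with he | hs
    · -- head is "end": start state becomes (some j) for the rest
      cases rest with
      | nil => simp [emitted, finSt, he]
      | cons q rest' =>
        obtain ⟨k, w⟩ := q
        have hkw : w = "end" ∨ w = "strt" := by
          simpa using h (k, w) (by simp)
        have hsome := emitted_some_cons k w rest' hkw j
        have hfin := finSt_some_cons k w rest' hkw j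
        have step : emitted ((j, v) :: (k, w) :: rest') none =
            (j, k) :: emitted ((k, w) :: rest') none := by
          rw [show emitted ((j, v) :: (k, w) :: rest') none =
              emitted ((k, w) :: rest') (some j) by simp [emitted, he], hsome]
        have stepf : finSt ((j, v) :: (k, w) :: rest') none =
            finSt ((k, w) :: rest') none := by
          rw [show finSt ((j, v) :: (k, w) :: rest') none =
              finSt ((k, w) :: rest') (some j) by simp [finSt, he], hfin]
        have ih' := ih hrest
        simp only [List.tail_cons] at ih'
        simp only [List.tail_cons, List.zip_cons_cons, List.filter_cons,
          List.getLast?_cons_cons, step, stepf]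
        simp only [he, beq_self_eq_true, if_true, List.map_cons, List.cons_append, ih']
    · -- head is "strt": it emits nothing and resets to none
      have hne : v ≠ "end" := by simp [hs]
      cases rest with
      | nil => simp [emitted, finSt, hs]
      | cons q rest' =>
        obtain ⟨k, w⟩ := q
        have step : emitted ((j, v) :: (k, w) :: rest') none =
            emitted ((k, w) :: rest') none := by simp [emitted, hs]
        have stepf : finSt ((j, v) :: (k, w) :: rest') none =
            finSt ((k, w) :: rest') none := by simp [finSt, hs]
        simp only [List.tail_cons, List.zip_cons_cons, List.filter_cons,
          List.getLast?_cons_cons, step, stepf]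
        have : ¬ (((j, v), (k, w)).1.2 == "end") = true := by simp [hne]
        simp only [this, if_neg, Bool.false_eq_true, not_false_eq_true]
        exact ih hrest

-- ===== VERDICT (by name: the statement is the Claim_ definition above) =====
theorem Off_On_grouping_spec : Claim_equal_Off_On_grouping := by
  intro indicator _
  unfold Spec_Off_On_grouping Off_On_grouping Off_On_grouping_alt
  have hA := foldA_eq (PySem.List.enumerate indicator) [] none
  have hB := b_core
      ((PySem.List.enumerate indicator).filter (fun p => p.2 == "end" || p.2 == "strt"))
      (allRel_filter _) (indicator.length : Int)
  rw [emitted_filter, finSt_filter] at hB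
  -- reshape B's body (append inside the match) into b_core's LHS shape
  have hBshape :
      (match ((PySem.List.enumerate indicator).filter
          (fun p => p.2 == "end" || p.2 == "strt")).getLast? with
       | some (j, v) =>
          if v == "end" then
            (((((PySem.List.enumerate indicator).filter (fun p => p.2 == "end" || p.2 == "strt")).zip
                ((PySem.List.enumerate indicator).filter (fun p => p.2 == "end" || p.2 == "strt")).tail).filter
                (fun q => q.1.2 == "end")).map (fun q => (q.1.1, q.2.1))) ++
              [(j, (indicator.length : Int))]
          else
            (((((PySem.List.enumerate indicator).filter (fun p => p.2 == "end" || p.2 == "strt")).zip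
                ((PySem.List.enumerate indicator).filter (fun p => p.2 == "end" || p.2 == "strt")).tail).filter
                (fun q => q.1.2 == "end")).map (fun q => (q.1.1, q.2.1)))
       | none =>
            (((((PySem.List.enumerate indicator).filter (fun p => p.2 == "end" || p.2 == "strt")).zip
                ((PySem.List.enumerate indicator).filter (fun p => p.2 == "end" || p.2 == "strt")).tail).filter
                (fun q => q.1.2 == "end")).map (fun q => (q.1.1, q.2.1))))
      = emitted (PySem.List.enumerate indicator) none ++
          (match finSt (PySem.List.enumerate indicator) none with
           | some s => [(s, (indicator.length : Int))] | none => []) := by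
    rw [← hB]
    cases ((PySem.List.enumerate indicator).filter
        (fun p => p.2 == "end" || p.2 == "strt")).getLast? with
    | none => simp
    | some p =>
      obtain ⟨j, v⟩ := p
      by_cases he : v = "end" <;> simp [he]
  simp only [hA, List.nil_append]
  cases hfin : finSt (PySem.List.enumerate indicator) none with
  | some s => simp only [hfin] at hBshape; simpa using hBshape.symm
  | none => simp only [hfin] at hBshape; simpa using hBshape.symm
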